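-- pv_equiv track=rewrite | github.com/haris860/Natural-Langauge-Processing | Viterbi Part-of-Speech Tagger/Program.py | create_tag_tag
-- ===== SOURCE A (Python) =====
-- def create_tag_tag(list_of_tags):
--     tag_tag = {}
--     start_tags = []
--     end_tags = []
--     for tag in list_of_tags:
--         start_tags.append(tag[0])
--         length = len(tag)
--         end_tags.append(tag[length - 1])
--         tag.insert(0, "START")
--         tag.append("END")
--         for i in range(len(tag) - 1):
--             tag_tag[tag[i]] = tag_tag.get(tag[i], {})
--             tag_tag[tag[i]][tag[i + 1]] = tag_tag[tag[i]].get(tag[i + 1], 0)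
--             tag_tag[tag[i]][tag[i + 1]] += 1
--     return tag_tag
-- ===== SOURCE B (Python) =====
-- def create_tag_tag(list_of_tags):
--     # Phase 1: mutate each tag list in place (prepend START, append END, like A)
--     # and materialise the flat list of all adjacent pairs.
--     pairs = []
--     for tag in list_of_tags:
--         tag.insert(0, "START")
--         tag.append("END")
--         pairs += list(zip(tag, tag[1:]))
--     # Phase 2: group the second components by first tag (no counting yet).
--     groups = {}
--     for a, b in pairs:
--         groups.setdefault(a, []).append(b)
--     # Phase 3: count inside each group with list.count over the deduped seconds —
--     # no count is ever incremented during a traversal.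
--     return {a: {b: bs.count(b) for b in dict.fromkeys(bs)}
--             for a, bs in groups.items()}
-- ===== Notes on version B (the rewrite author's own statement) =====
-- stated objective: alternative
-- what changed: B replaces A's one-pass incremental nested-dict counting (with dead start/end-tag accumulators) by staged passes: it materialises the flat list of adjacent pairs over the mutated tag lists, groups the second components by first tag with setdefault-append, and only then computes every count with list.count over the deduped seconds of each group - no count is ever incremented during a traversal; both mutate the input lists identically.
import Mathlib
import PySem

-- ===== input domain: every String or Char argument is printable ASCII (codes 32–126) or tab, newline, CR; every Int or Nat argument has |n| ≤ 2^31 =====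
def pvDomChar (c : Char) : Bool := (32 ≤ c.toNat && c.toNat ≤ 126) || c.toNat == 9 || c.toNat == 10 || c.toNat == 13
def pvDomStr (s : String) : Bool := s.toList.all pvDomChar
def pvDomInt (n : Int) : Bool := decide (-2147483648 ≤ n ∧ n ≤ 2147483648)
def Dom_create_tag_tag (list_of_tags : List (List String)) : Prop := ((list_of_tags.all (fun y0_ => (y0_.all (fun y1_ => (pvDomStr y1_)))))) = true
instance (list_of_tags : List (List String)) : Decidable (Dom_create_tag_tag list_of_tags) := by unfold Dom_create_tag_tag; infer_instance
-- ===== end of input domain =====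

-- B: group-by rewrite of A's one-pass incremental nested-dict count — B materialises the flat pair
-- list, then per distinct first tag filters the following tags and counts with list.count; both A
-- and B mutate each inner list identically (prepend "START", append "END") — the equivalence
-- proved here is about the RETURN value only.


-- ===== PORT A =====
-- literal port: fold state is (tag_tag, start_tags, end_tags); the three dict statements of the
-- inner loop are kept as three successive value updates. tag[0] / tag[length-1] are ported with
-- pyGetD "" — Python raises there exactly when a tag list is empty, which Pre_ excludes.
def create_tag_tag (list_of_tags : List (List String)) : List (String × List (String × Int)) :=
  let st := list_of_tags.foldl
    (fun (st : PySem.Dict String (PySem.Dict String Int) × List String × List String) tag =>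
      let start_tags := st.2.1 ++ [PySem.List.pyGetD tag 0 ""]                  -- start_tags.append(tag[0])
      let length : Int := PySem.List.len tag
      let end_tags := st.2.2 ++ [PySem.List.pyGetD tag (length - 1) ""]         -- end_tags.append(tag[length-1])
      let tag2 := PySem.List.insert tag 0 "START" ++ ["END"]                    -- tag.insert(0,"START"); tag.append("END")
      let tag_tag := (PySem.List.pyRange 0 (PySem.List.len tag2 - 1) 1).foldl
        (fun tt i =>
          let a := PySem.List.pyGetD tag2 i ""
          let b := PySem.List.pyGetD tag2 (i + 1) ""
          let tt := tt.insert a (tt.getD a PySem.Dict.empty)                    -- tag_tag[a] = tag_tag.get(a, {})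
          let tt := tt.insert a ((tt.getD a PySem.Dict.empty).insert b
                      ((tt.getD a PySem.Dict.empty).getD b 0))                  -- tag_tag[a][b] = tag_tag[a].get(b, 0)
          let tt := tt.insert a ((tt.getD a PySem.Dict.empty).insert b
                      ((tt.getD a PySem.Dict.empty).getD b 0 + 1))              -- tag_tag[a][b] += 1
          tt)
        st.1
      (tag_tag, start_tags, end_tags))
    (PySem.Dict.empty, [], [])
  st.1.items.map (fun p => (p.1, p.2.items))

-- ===== PORT B =====
-- phase 1: mutate each list and accumulate the flat pair list (zip(tag, tag[1:]));
-- phase 2: groups.setdefault(a, []).append(b) = Dict.modify a [] (· ++ [b]);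
-- phase 3: {b: bs.count(b) for b in dict.fromkeys(bs)} = fold of inserts over the deduped bs.
def create_tag_tag_alt (list_of_tags : List (List String)) : List (String × List (String × Int)) :=
  let pairs := list_of_tags.foldl
    (fun (ps : List (String × String)) tag =>
      let tag2 := PySem.List.insert tag 0 "START" ++ ["END"]                    -- tag.insert(0,"START"); tag.append("END")
      ps ++ tag2.zip (PySem.List.slice tag2 (some 1) none))                     -- pairs += list(zip(tag, tag[1:]))
    []
  let groups := pairs.foldl
    (fun (g : PySem.Dict String (List String)) p =>
      g.modify p.1 [] (fun bs => bs ++ [p.2]))                                  -- groups.setdefault(a, []).append(b)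
    PySem.Dict.empty
  let result := groups.items.foldl
    (fun (res : PySem.Dict String (PySem.Dict String Int)) ab =>
      res.insert ab.1 ((PySem.List.dedup ab.2).foldl
        (fun inner b => inner.insert b ((ab.2.count b : Int))) PySem.Dict.empty)) -- {b: bs.count(b) for b in dict.fromkeys(bs)}
    PySem.Dict.empty
  result.items.map (fun p => (p.1, p.2.items))

-- ===== PRECONDITION & SPEC =====
-- Pre_ excludes exactly the inputs where Python A raises: tag[0] is an IndexError on an empty inner list.
def Pre_create_tag_tag (list_of_tags : List (List String)) : Prop :=
  ∀ tag ∈ list_of_tags, tag ≠ []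
instance (list_of_tags : List (List String)) : Decidable (Pre_create_tag_tag list_of_tags) := by
  unfold Pre_create_tag_tag; infer_instance
def pvWitness_create_tag_tag : List (List String) := [["N", "V"], ["N"]]

def Spec_create_tag_tag (list_of_tags : List (List String)) (out : List (String × List (String × Int))) : Prop := out = create_tag_tag_alt list_of_tags
instance (list_of_tags : List (List String)) (out : List (String × List (String × Int))) : Decidable (Spec_create_tag_tag list_of_tags out) := by unfold Spec_create_tag_tag; infer_instance

-- ===== CLAIM (what is proved, stated in full; the proofs are below) =====
def Claim_equal_create_tag_tag : Prop := ∀ (list_of_tags : List (List String)), Dom_create_tag_tag list_of_tags → Pre_create_tag_tag list_of_tags → Spec_create_tag_tag list_of_tags (create_tag_tag list_of_tags)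

-- ===== LEMMAS AND PROOFS =====

-- the canonical per-pair nested-count step (what one iteration of A's inner loop does)
def nstep (tt : PySem.Dict String (PySem.Dict String Int)) (a b : String) :
    PySem.Dict String (PySem.Dict String Int) :=
  tt.insert a ((tt.getD a PySem.Dict.empty).insert b ((tt.getD a PySem.Dict.empty).getD b 0 + 1))

def pairsOf (tag : List String) : List (String × String) :=
  let t2 := "START" :: (tag ++ ["END"])
  t2.zip t2.tail

-- the seconds that follow a in the flat pair list
def secondsOf (ps : List (String × String)) (a : String) : List String :=
  (ps.filter (fun q => q.1 == a)).map (fun q => q.2)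

theorem stepA_eq_nstep (tt : PySem.Dict String (PySem.Dict String Int)) (a b : String) :
    (let tt1 := tt.insert a (tt.getD a PySem.Dict.empty)
     let tt2 := tt1.insert a ((tt1.getD a PySem.Dict.empty).insert b
                  ((tt1.getD a PySem.Dict.empty).getD b 0))
     tt2.insert a ((tt2.getD a PySem.Dict.empty).insert b
                  ((tt2.getD a PySem.Dict.empty).getD b 0 + 1))) = nstep tt a b := by
  simp [nstep, PySem.Dict.getD_insert_self, PySem.Dict.insert_insert_self]

-- Nat-level: an index loop over adjacent positions is the zip with the tail
theorem foldl_range_adjacent {α β : Type} (d : α) (g : β → α → α → β) :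
    ∀ (xs : List α) (init : β),
      (List.range (xs.length - 1)).foldl (fun s k => g s (xs.getD k d) (xs.getD (k + 1) d)) init
        = (xs.zip xs.tail).foldl (fun s p => g s p.1 p.2) init := by
  intro xs
  induction xs with
  | nil => intro init; simp
  | cons x t ih =>
    intro init
    cases t with
    | nil => simp
    | cons y t' =>
      simp only [List.length_cons, Nat.add_sub_cancel, List.range_succ_eq_map,
        List.foldl_cons, List.foldl_map, List.zip_cons_cons, List.tail_cons]
      have hgd : ∀ (k : Nat), (x :: y :: t').getD (k.succ) d = (y :: t').getD k d := by
        intro k; rfl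
      simp only [List.getD_cons_zero, List.getD_cons_succ, hgd]
      have := ih (g init x y)
      simp only [List.length_cons, Nat.add_sub_cancel, List.tail_cons] at this
      convert this using 2 with s k

-- pyRange/pyGetD form of the previous lemma
theorem foldl_pyRange_adjacent {α β : Type} (d : α) (g : β → α → α → β) (xs : List α) (init : β) :
    (PySem.List.pyRange 0 (PySem.List.len xs - 1) 1).foldl
        (fun s i => g s (PySem.List.pyGetD xs i d) (PySem.List.pyGetD xs (i + 1) d)) init
      = (xs.zip xs.tail).foldl (fun s p => g s p.1 p.2) init := by
  rw [← foldl_range_adjacent d g xs init]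
  rw [PySem.List.pyRange_one, List.foldl_map, PySem.List.len_eq]
  have he : ((xs.length : Int) - 1 - 0).toNat = xs.length - 1 := by omega
  rw [he]
  apply List.foldl_ext
  intro s k hk
  simp only [zero_add]
  have h2 : (k : Int) + 1 = (((k + 1 : Nat)) : Int) := by push_cast; ring
  rw [h2, PySem.List.pyGetD_natCast, PySem.List.pyGetD_natCast]

-- A's dict equals the nstep-fold over all pairs
theorem innerA_eq (t2 : List String) (tt : PySem.Dict String (PySem.Dict String Int)) :
    (PySem.List.pyRange 0 (PySem.List.len t2 - 1) 1).foldl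
      (fun tt i =>
        let a := PySem.List.pyGetD t2 i ""
        let b := PySem.List.pyGetD t2 (i + 1) ""
        let tt := tt.insert a (tt.getD a PySem.Dict.empty)
        let tt := tt.insert a ((tt.getD a PySem.Dict.empty).insert b
                    ((tt.getD a PySem.Dict.empty).getD b 0))
        let tt := tt.insert a ((tt.getD a PySem.Dict.empty).insert b
                    ((tt.getD a PySem.Dict.empty).getD b 0 + 1))
        tt) tt
    = (t2.zip t2.tail).foldl (fun tt p => nstep tt p.1 p.2) tt := by
  refine (foldl_pyRange_adjacent ""
    (fun tt a b =>
      let tt1 := tt.insert a (tt.getD a PySem.Dict.empty)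
      let tt2 := tt1.insert a ((tt1.getD a PySem.Dict.empty).insert b
                  ((tt1.getD a PySem.Dict.empty).getD b 0))
      tt2.insert a ((tt2.getD a PySem.Dict.empty).insert b
                  ((tt2.getD a PySem.Dict.empty).getD b 0 + 1)))
    t2 tt).trans ?_
  apply List.foldl_ext
  intro tt' p _
  exact stepA_eq_nstep tt' p.1 p.2

theorem portA_dict (lol : List (List String)) :
    create_tag_tag lol
      = ((lol.flatMap pairsOf).foldl (fun tt p => nstep tt p.1 p.2) PySem.Dict.empty).items.map
          (fun p => (p.1, p.2.items)) := by
  unfold create_tag_tag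
  rw [List.foldl_flatMap]
  have h : ∀ (l : List (List String)) (tt : PySem.Dict String (PySem.Dict String Int))
      (st en : List String),
      (l.foldl
        (fun (st : PySem.Dict String (PySem.Dict String Int) × List String × List String) tag =>
          let start_tags := st.2.1 ++ [PySem.List.pyGetD tag 0 ""]
          let length : Int := PySem.List.len tag
          let end_tags := st.2.2 ++ [PySem.List.pyGetD tag (length - 1) ""]
          let tag2 := PySem.List.insert tag 0 "START" ++ ["END"]
          let tag_tag := (PySem.List.pyRange 0 (PySem.List.len tag2 - 1) 1).foldl
            (fun tt i =>
              let a := PySem.List.pyGetD tag2 i ""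
              let b := PySem.List.pyGetD tag2 (i + 1) ""
              let tt := tt.insert a (tt.getD a PySem.Dict.empty)
              let tt := tt.insert a ((tt.getD a PySem.Dict.empty).insert b
                          ((tt.getD a PySem.Dict.empty).getD b 0))
              let tt := tt.insert a ((tt.getD a PySem.Dict.empty).insert b
                          ((tt.getD a PySem.Dict.empty).getD b 0 + 1))
              tt)
            st.1
          (tag_tag, start_tags, end_tags)) (tt, st, en)).1
      = l.foldl (fun acc tag => (pairsOf tag).foldl (fun tt p => nstep tt p.1 p.2) acc) tt := by
    intro l
    induction l with
    | nil => intro tt st en; rfl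
    | cons tag rest ih =>
      intro tt st en
      rw [List.foldl_cons, List.foldl_cons, ih]
      congr 1
      exact innerA_eq ("START" :: (tag ++ ["END"])) tt
  exact congrArg (fun d => d.items.map (fun p => (p.1, p.2.items)))
    (h lol PySem.Dict.empty [] [])

-- the nstep-fold inserts at key p.1 — keys and their uniqueness come from the library lemmas
theorem nstep_as_insert_key (ps : List (String × String)) (d : PySem.Dict String (PySem.Dict String Int)) :
    ps.foldl (fun tt p => nstep tt p.1 p.2) d
      = ps.foldl (fun tt p => tt.insert p.1
          ((tt.getD p.1 PySem.Dict.empty).insert p.2 ((tt.getD p.1 PySem.Dict.empty).getD p.2 0 + 1))) d := rfl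

theorem keys_fold_nstep (ps : List (String × String)) :
    (ps.foldl (fun tt p => nstep tt p.1 p.2) PySem.Dict.empty).keys
      = PySem.Set.ofList (ps.map (fun p => p.1)) := by
  rw [nstep_as_insert_key,
    PySem.Dict.keys_foldl_insert_key ps (fun p => p.1)
      (fun tt p => (tt.getD p.1 PySem.Dict.empty).insert p.2 ((tt.getD p.1 PySem.Dict.empty).getD p.2 0 + 1))
      PySem.Dict.empty]
  simp [PySem.Set.update_nil_left]

theorem nodup_keys_fold_nstep (ps : List (String × String)) :
    (ps.foldl (fun tt p => nstep tt p.1 p.2) PySem.Dict.empty).keys.Nodup := by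
  rw [nstep_as_insert_key]
  exact PySem.Dict.nodup_keys_foldl_insert_key ps (fun p => p.1) _ PySem.Dict.empty
    (by simp)

-- the inner dict at key a is the counting fold over the seconds that follow a
theorem getD_fold_nstep (a : String) :
    ∀ (ps : List (String × String)) (d : PySem.Dict String (PySem.Dict String Int)),
      (ps.foldl (fun tt p => nstep tt p.1 p.2) d).getD a PySem.Dict.empty
        = (secondsOf ps a).foldl (fun inner b => inner.insert b (inner.getD b 0 + 1))
            (d.getD a PySem.Dict.empty) := by
  intro ps
  induction ps with
  | nil => intro d; simp [secondsOf]
  | cons p t ih =>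
    intro d
    obtain ⟨pa, pb⟩ := p
    rw [List.foldl_cons, ih]
    unfold secondsOf
    by_cases h : pa = a
    · subst h
      simp only [List.filter_cons, beq_self_eq_true, if_true, List.map_cons, List.foldl_cons]
      congr 1
      unfold nstep
      rw [PySem.Dict.getD_insert_self]
    · have hb : ((pa, pb).1 == a) = false := by simpa using h
      simp only [List.filter_cons, hb, Bool.false_eq_true, if_false]
      congr 1
      unfold nstep
      exact PySem.Dict.getD_insert_of_ne _ _ _ (fun hh => h hh.symm)

-- ===== the canonical group-by form both ports reduce to =====
def canonOf (ps : List (String × String)) : List (String × List (String × Int)) :=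
  (PySem.Set.ofList (ps.map (fun p => p.1))).map
    (fun a => (a, (PySem.Set.ofList (secondsOf ps a)).map
                    (fun b => (b, ((secondsOf ps a).count b : Int)))))

theorem portA_canon (lol : List (List String)) :
    create_tag_tag lol = canonOf (lol.flatMap pairsOf) := by
  rw [portA_dict]
  set ps := lol.flatMap pairsOf with hps
  set d := ps.foldl (fun tt p => nstep tt p.1 p.2) PySem.Dict.empty with hd
  rw [PySem.Dict.items_eq_map_keys d (nodup_keys_fold_nstep ps) PySem.Dict.empty,
    List.map_map]
  rw [keys_fold_nstep]
  unfold canonOf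
  apply List.map_congr_left
  intro a _
  simp only [Function.comp_apply]
  rw [hd, getD_fold_nstep a ps PySem.Dict.empty]
  rw [PySem.Dict.getD_empty, PySem.Dict.foldl_insert_getD_add_one_eq_counter,
    PySem.Dict.items_counter]

-- B's inner dict comprehension over a group's seconds
def innerOf (bs : List String) : PySem.Dict String Int :=
  (PySem.List.dedup bs).foldl (fun inner b => inner.insert b ((bs.count b : Int))) PySem.Dict.empty

theorem innerOf_items (bs : List String) :
    (innerOf bs).items = (PySem.Set.ofList bs).map (fun b => (b, (bs.count b : Int))) := by
  unfold innerOf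
  rw [PySem.Dict.items_foldl_insert_fresh (l := PySem.List.dedup bs)
    (k := fun b => b) (v := fun b => ((bs.count b : Int)))
    (d := PySem.Dict.empty) (by intro b _; simp) (by simp)]
  have hemp : (PySem.Dict.empty : PySem.Dict String Int).items = [] := rfl
  rw [hemp, List.nil_append, PySem.List.dedup_eq_ofList]

-- B's group-then-count phases, read off into the canonical form
theorem groupby_canon (ps : List (String × String)) :
    (((ps.foldl (fun (g : PySem.Dict String (List String)) p =>
          g.modify p.1 [] (fun bs => bs ++ [p.2])) PySem.Dict.empty).items).foldl
        (fun (res : PySem.Dict String (PySem.Dict String Int)) ab => res.insert ab.1 (innerOf ab.2))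
        PySem.Dict.empty).items.map (fun p => (p.1, p.2.items))
      = canonOf ps := by
  set G := ps.foldl (fun (g : PySem.Dict String (List String)) p =>
      g.modify p.1 [] (fun bs => bs ++ [p.2])) PySem.Dict.empty with hG
  have hnodup : G.keys.Nodup := by
    rw [hG]
    exact PySem.Dict.nodup_keys_foldl_modify_key ps (fun p => p.1) []
      (fun g p => fun bs => bs ++ [p.2]) PySem.Dict.empty (by simp)
  have hkeys : G.keys = PySem.Set.ofList (ps.map (fun p => p.1)) := by
    rw [hG, PySem.Dict.keys_foldl_modify_key ps (fun p => p.1) []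
      (fun g p => fun bs => bs ++ [p.2]) PySem.Dict.empty]
    simp [PySem.Set.update_nil_left]
  have hget : ∀ a, G.getD a [] = secondsOf ps a := by
    intro a
    rw [hG, PySem.Dict.getD_foldl_modify_append]
    simp [secondsOf]
  have hfresh : ∀ ab ∈ G.items, (PySem.Dict.empty :
      PySem.Dict String (PySem.Dict String Int)).contains ab.1 = false := by
    intro ab _; simp
  rw [PySem.Dict.items_foldl_insert_fresh (l := G.items) (k := fun ab => ab.1)
    (v := fun ab => innerOf ab.2) (d := PySem.Dict.empty) hfresh hnodup]
  have hemp : (PySem.Dict.empty : PySem.Dict String (PySem.Dict String Int)).items = [] := rfl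
  rw [hemp, List.nil_append, List.map_map,
    PySem.Dict.items_eq_map_keys G hnodup [], List.map_map, hkeys]
  unfold canonOf
  apply List.map_congr_left
  intro a _
  simp [Function.comp, innerOf_items, hget]

theorem portB_canon (lol : List (List String)) :
    create_tag_tag_alt lol = canonOf (lol.flatMap pairsOf) := by
  unfold create_tag_tag_alt
  have hpairs : lol.foldl
      (fun (ps : List (String × String)) tag =>
        let tag2 := PySem.List.insert tag 0 "START" ++ ["END"]
        ps ++ tag2.zip (PySem.List.slice tag2 (some 1) none)) []
      = lol.flatMap pairsOf := by
    rw [PySem.List.foldl_append_eq_flatMap]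
    apply List.flatMap_congr
    intro tag _
    have htag2 : PySem.List.insert tag 0 "START" ++ ["END"]
        = "START" :: (tag ++ ["END"]) := by
      rw [PySem.List.insert_zero]; rfl
    simp only [htag2, PySem.List.slice_from_one]
    rfl
  rw [hpairs]
  exact groupby_canon (lol.flatMap pairsOf)

-- ===== VERDICT (by name: the statement is the Claim_ definition above) =====
theorem create_tag_tag_spec : Claim_equal_create_tag_tag := by
  intro lol _ _
  unfold Spec_create_tag_tag
  rw [portA_canon, portB_canon]
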